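-- pv_equiv track=rewrite | github.com/rishabhc9/CharEncoding-Python-Library | __init__.py | encode_base32_crockford
-- ===== SOURCE A (Python) =====
-- def encode_base32_crockford(string):
--
--     characters = '0123456789ABCDEFGHJKMNPQRSTVWXYZ'
--
--     binary_string = ''.join(format(ord(char), '08b') for char in string)
--     while len(binary_string) % 5 != 0:
--         binary_string += '0'
--
--     encoded_string = ''
--     for i in range(0, len(binary_string), 5):
--         chunk = binary_string[i:i+5]
--         index = int(chunk, 2)
--         encoded_string += characters[index]
--
--     return encoded_string
-- ===== SOURCE B (Python) =====
-- def encode_base32_crockford(string):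
--     characters = '0123456789ABCDEFGHJKMNPQRSTVWXYZ'
--     acc = 0
--     nbits = 0
--     out = []
--     for char in string:
--         acc = (acc << 8) | ord(char)
--         nbits += 8
--         while nbits >= 5:
--             nbits -= 5
--             out.append(characters[(acc >> nbits) & 0x1F])
--         acc &= (1 << nbits) - 1
--     if nbits > 0:
--         out.append(characters[(acc << (5 - nbits)) & 0x1F])
--     return ''.join(out)
-- ===== Notes on version B (the rewrite author's own statement) =====
-- stated objective: alternative
-- what changed: Replaces the build-a-binary-string-then-rechunk two-pass approach with a single pass keeping an integer bit accumulator (acc, nbits): each character contributes 8 bits, one base32 character is emitted per 5 available bits, and leftover bits are flushed left-padded to 5 at the end; avoids materialising the 8n-character binary string.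
import Mathlib
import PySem

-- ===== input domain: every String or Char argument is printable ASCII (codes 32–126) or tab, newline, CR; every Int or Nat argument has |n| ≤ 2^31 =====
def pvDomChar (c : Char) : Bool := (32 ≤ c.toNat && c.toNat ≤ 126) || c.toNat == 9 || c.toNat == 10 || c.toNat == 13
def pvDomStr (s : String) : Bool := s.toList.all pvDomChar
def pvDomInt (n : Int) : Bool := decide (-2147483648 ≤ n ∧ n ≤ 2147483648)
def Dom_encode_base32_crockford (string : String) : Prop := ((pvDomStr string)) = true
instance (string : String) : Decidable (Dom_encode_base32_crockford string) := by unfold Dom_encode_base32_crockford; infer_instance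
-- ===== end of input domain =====

-- B replaces A's build-a-binary-string-then-rechunk two passes with one pass keeping a small
-- integer bit accumulator (8 bits per character), emitting a character per 5 available bits.


-- ===== PORT A =====
-- characters[i]; the index is always < 32 in both programs (a 5-bit value), where getD is exact
def charAt (i : Nat) : Char := "0123456789ABCDEFGHJKMNPQRSTVWXYZ".toList.getD i '0'

-- format(n, 'b') without padding: binary digits of n, big-endian ('0' for n = 0)
def natToBinCore (n : Nat) : List Char :=
  if n = 0 then [] else natToBinCore (n / 2) ++ [if n % 2 = 1 then '1' else '0']
decreasing_by exact Nat.div_lt_self (Nat.pos_of_ne_zero (by assumption)) one_lt_two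

def natToBin (n : Nat) : List Char := if n = 0 then ['0'] else natToBinCore n

-- the '08' of format '08b': left-pad with '0' to width 8
def pad8 (l : List Char) : List Char := List.replicate (8 - l.length) '0' ++ l

-- while len(binary_string) % 5 != 0: binary_string += '0'  (structural on a fuel of 4,
-- which provably covers every run of the while loop: at most 4 zeros are ever appended)
def padLoop : Nat → List Char → List Char
  | 0, bs => bs
  | fuel + 1, bs => if bs.length % 5 ≠ 0 then padLoop fuel (bs ++ ['0']) else bs

-- int(chunk, 2): exact on strings of '0'/'1', which is all it is applied to
def binToNat (bs : List Char) : Nat := bs.foldl (fun a c => a * 2 + (if c = '1' then 1 else 0)) 0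

-- for i in range(0, len, 5): encoded_string += characters[int(binary_string[i:i+5], 2)]
def encLoop (bs : List Char) : List Char :=
  if h : bs.isEmpty then [] else charAt (binToNat (bs.take 5)) :: encLoop (bs.drop 5)
termination_by bs.length
decreasing_by
  simp only [List.isEmpty_iff] at h
  have := List.length_pos_of_ne_nil h
  simp only [List.length_drop]
  omega

def encode_base32_crockford (string : String) : String :=
  let binary_string := string.toList.flatMap (fun c => pad8 (natToBin c.toNat))
  String.mk (encLoop (padLoop 4 binary_string))

-- ===== PORT B =====
-- while nbits >= 5: nbits -= 5; out.append(characters[(acc >> nbits) & 0x1F])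
def emitLoop (acc : Nat) (nbits : Nat) (out : List Char) : Nat × List Char :=
  if nbits ≥ 5 then emitLoop acc (nbits - 5) (out ++ [charAt ((acc >>> (nbits - 5)) &&& 31)])
  else (nbits, out)
termination_by nbits
decreasing_by omega

-- loop body: acc = (acc << 8) | ord(char); nbits += 8; while …; acc &= (1 << nbits) - 1
def stepB (st : Nat × Nat × List Char) (c : Char) : Nat × Nat × List Char :=
  let acc := (st.1 <<< 8) ||| c.toNat
  let p := emitLoop acc (st.2.1 + 8) st.2.2
  (acc &&& (1 <<< p.1 - 1), p.1, p.2)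

def encode_base32_crockford_alt (string : String) : String :=
  let st := string.toList.foldl stepB (0, 0, [])
  String.mk (if st.2.1 > 0 then st.2.2 ++ [charAt ((st.1 <<< (5 - st.2.1)) &&& 31)] else st.2.2)

-- ===== PRECONDITION & SPEC =====
def Spec_encode_base32_crockford (string : String) (out : String) : Prop := out = encode_base32_crockford_alt string
instance (string : String) (out : String) : Decidable (Spec_encode_base32_crockford string out) := by unfold Spec_encode_base32_crockford; infer_instance

-- ===== CLAIM (what is proved, stated in full; the proofs are below) =====
def Claim_equal_encode_base32_crockford : Prop := ∀ (string : String), Dom_encode_base32_crockford string → Spec_encode_base32_crockford string (encode_base32_crockford string)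

-- ===== LEMMAS AND PROOFS =====

theorem and31_eq_mod (x : Nat) : x &&& 31 = x % 32 := Nat.and_two_pow_sub_one_eq_mod x 5

-- big-endian w-bit representation of n (proof-side reference)
def toBits : Nat → Nat → List Char
  | 0, _ => []
  | w + 1, n => toBits w (n / 2) ++ [if n % 2 = 1 then '1' else '0']

def allBits (cs : List Char) : List Char := cs.flatMap (fun c => toBits 8 c.toNat)

def finalize (st : Nat × Nat × List Char) : List Char :=
  if st.2.1 > 0 then st.2.2 ++ [charAt ((st.1 <<< (5 - st.2.1)) &&& 31)] else st.2.2

theorem toBits_length (w n : Nat) : (toBits w n).length = w := by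
  induction w generalizing n with
  | zero => rfl
  | succ w ih => simp [toBits, ih]

theorem toBits_split (b a n : Nat) : toBits (a + b) n = toBits a (n / 2 ^ b) ++ toBits b n := by
  induction b generalizing n with
  | zero => simp [toBits]
  | succ b ih =>
    show toBits (a + b + 1) n = _
    rw [toBits, ih, toBits, List.append_assoc, Nat.div_div_eq_div_mul]
    ring_nf

theorem toBits_irrel (b x y : Nat) (hy : y < 2 ^ b) : toBits b (x * 2 ^ b + y) = toBits b y := by
  induction b generalizing x y with
  | zero => rfl
  | succ b ih =>
    have h2 : (2:Nat) ^ (b+1) = 2 * 2 ^ b := by ring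
    have hdiv : (x * 2 ^ (b+1) + y) / 2 = x * 2 ^ b + y / 2 := by
      rw [h2, show x * (2 * 2 ^ b) = 2 * (x * 2 ^ b) by ring]; omega
    have hmod : (x * 2 ^ (b+1) + y) % 2 = y % 2 := by
      rw [h2, show x * (2 * 2 ^ b) = 2 * (x * 2 ^ b) by ring]; omega
    rw [toBits, toBits, hdiv, hmod, ih x (y / 2) (by omega)]

theorem toBits_append (a b x y : Nat) (hy : y < 2 ^ b) :
    toBits a x ++ toBits b y = toBits (a + b) (x * 2 ^ b + y) := by
  rw [toBits_split, show x * 2 ^ b + y = 2 ^ b * x + y by ring,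
    Nat.mul_add_div (Nat.two_pow_pos b), Nat.div_eq_of_lt hy, add_zero,
    show 2 ^ b * x + y = x * 2 ^ b + y by ring, toBits_irrel _ _ _ hy]

theorem binFold (bs : List Char) (a : Nat) :
    bs.foldl (fun a c => a * 2 + (if c = '1' then 1 else 0)) a
      = a * 2 ^ bs.length + binToNat bs := by
  induction bs generalizing a with
  | nil => simp [binToNat]
  | cons c bs ih =>
    simp only [List.foldl_cons, binToNat, List.length_cons]
    rw [ih, ih (0 * 2 + _)]
    ring

theorem binToNat_append (xs ys : List Char) :
    binToNat (xs ++ ys) = binToNat xs * 2 ^ ys.length + binToNat ys := by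
  unfold binToNat
  rw [List.foldl_append, binFold]
  rfl

theorem binToNat_replicate_zero (k : Nat) : binToNat (List.replicate k '0') = 0 := by
  induction k with
  | zero => rfl
  | succ k ih =>
    rw [List.replicate_succ]
    unfold binToNat at *
    simpa using ih

theorem binToNat_toBits (w n : Nat) : binToNat (toBits w n) = n % 2 ^ w := by
  induction w generalizing n with
  | zero => simp [toBits, binToNat, Nat.mod_one]
  | succ w ih =>
    rw [toBits, binToNat_append, ih]
    have h6 : (2:Nat) ^ (w + 1) = 2 * 2 ^ w := by ring
    have e1 : 2 * (n / 2) + n % 2 = n := Nat.div_add_mod n 2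
    have e2 : 2 ^ w * (n / 2 / 2 ^ w) + n / 2 % 2 ^ w = n / 2 := Nat.div_add_mod (n / 2) (2 ^ w)
    have e3 : 2 ^ (w + 1) * (n / 2 ^ (w + 1)) + n % 2 ^ (w + 1) = n := Nat.div_add_mod n (2 ^ (w + 1))
    have e4 : n / 2 ^ (w + 1) = n / 2 / 2 ^ w := by
      rw [Nat.div_div_eq_div_mul, ← h6]
    rw [e4, h6, show 2 * 2 ^ w * (n / 2 / 2 ^ w) = 2 * (2 ^ w * (n / 2 / 2 ^ w)) by ring] at e3
    simp only [List.length_singleton, binToNat, List.foldl_cons, List.foldl_nil, pow_one]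
    rw [h6]
    rcases Nat.mod_two_eq_zero_or_one n with h | h <;> rw [h] at e1 <;> simp [h] <;> omega

theorem padGo_spec : ∀ (fuel : Nat) (bs : List Char), (5 - bs.length % 5) % 5 ≤ fuel →
    padLoop fuel bs = bs ++ List.replicate ((5 - bs.length % 5) % 5) '0' := by
  intro fuel
  induction fuel with
  | zero =>
    intro bs h
    have h0 : bs.length % 5 = 0 := by omega
    simp [padLoop, h0]
  | succ k ih =>
    intro bs h
    by_cases h0 : bs.length % 5 = 0
    · simp [padLoop, h0]
    · rw [padLoop, if_pos h0, ih (bs ++ ['0']) (by simp [List.length_append]; omega)]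
      have : (5 - (bs ++ ['0']).length % 5) % 5 + 1 = (5 - bs.length % 5) % 5 := by
        simp [List.length_append]; omega
      rw [List.append_assoc, List.singleton_append, ← List.replicate_succ, this]

theorem padLoop_eq (bs : List Char) :
    padLoop 4 bs = bs ++ List.replicate ((5 - bs.length % 5) % 5) '0' :=
  padGo_spec 4 bs (by omega)

theorem padLoop_append5 (X Y : List Char) (h : X.length % 5 = 0) :
    padLoop 4 (X ++ Y) = X ++ padLoop 4 Y := by
  rw [padLoop_eq, padLoop_eq,
    show (5 - (X ++ Y).length % 5) % 5 = (5 - Y.length % 5) % 5 by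
      simp only [List.length_append]; omega,
    List.append_assoc]

theorem encLoop_append5 (n : Nat) : ∀ (X Z : List Char), X.length = 5 * n →
    encLoop (X ++ Z) = encLoop X ++ encLoop Z := by
  induction n with
  | zero =>
    intro X Z h
    have hX : X = [] := List.eq_nil_of_length_eq_zero (by omega)
    have h0 : encLoop [] = [] := by rw [encLoop]; simp
    simp [hX, h0]
  | succ k ih =>
    intro X Z h
    have hX : X ≠ [] := by intro h'; rw [h'] at h; simp at h
    have h5 : 5 ≤ X.length := by omega
    rw [encLoop.eq_def, encLoop.eq_def (bs := X)]
    rw [dif_neg (by simp [List.isEmpty_iff, hX]), dif_neg (by simp [List.isEmpty_iff, hX])]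
    rw [List.take_append_of_le_length h5, List.drop_append_of_le_length h5]
    rw [ih (X.drop 5) Z (by simp only [List.length_drop]; omega)]
    simp

theorem encLooponce {bs : List Char} (h : bs.length = 5) :
    encLoop bs = [charAt (binToNat bs)] := by
  rw [encLoop, dif_neg (by simp [List.isEmpty_iff]; intro h'; rw [h'] at h; simp at h)]
  rw [List.take_of_length_le (by omega), List.drop_eq_nil_of_le (by omega), encLoop]
  simp

theorem emitLoop_spec (acc nbits : Nat) (out : List Char) :
    emitLoop acc nbits out
      = (nbits % 5, out ++ encLoop (toBits (nbits - nbits % 5) (acc / 2 ^ (nbits % 5)))) := by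
  fun_induction emitLoop acc nbits out with
  | case1 nbits out h ih =>
    rw [ih]
    have hf : (nbits - 5) % 5 = nbits % 5 := by omega
    set f := nbits % 5 with hfdef
    have hsplit : toBits (nbits - f) (acc / 2 ^ f)
        = toBits 5 (acc / 2 ^ (nbits - 5)) ++ toBits (nbits - 5 - f) (acc / 2 ^ f) := by
      have h1 : nbits - f = 5 + (nbits - 5 - f) := by omega
      rw [h1, toBits_split]
      congr 2
      rw [Nat.div_div_eq_div_mul, ← pow_add]
      congr 2
      omega
    have hlen5 : (toBits 5 (acc / 2 ^ (nbits - 5))).length = 5 := toBits_length _ _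
    refine Prod.ext (by simp [hf]) ?_
    simp only [hf, hsplit]
    rw [encLoop_append5 1 _ _ (by simp [hlen5]), encLooponce hlen5, binToNat_toBits]
    have hsr : acc >>> (nbits - 5) = acc / 2 ^ (nbits - 5) := Nat.shiftRight_eq_div_pow _ _
    simp [and31_eq_mod, hsr, List.append_assoc]
  | case2 nbits out h =>
    have h5 : nbits % 5 = nbits := Nat.mod_eq_of_lt (by omega)
    rw [encLoop]
    simp [h5, toBits]

theorem toBits_zero (w : Nat) : toBits w 0 = List.replicate w '0' := by
  induction w with
  | zero => rfl
  | succ w ih => rw [toBits]; simp [ih, ← List.replicate_succ']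

theorem core_step (n : Nat) (h : n ≠ 0) :
    natToBinCore n = natToBinCore (n / 2) ++ [if n % 2 = 1 then '1' else '0'] := by
  rw [natToBinCore]
  simp [h]

theorem core_pad (w : Nat) : ∀ n, n < 2 ^ w →
    List.replicate (w - (natToBinCore n).length) '0' ++ natToBinCore n = toBits w n := by
  induction w with
  | zero =>
    intro n h
    have h0 : n = 0 := by omega
    subst h0
    rw [natToBinCore]
    simp [toBits]
  | succ w ih =>
    intro n h
    by_cases h0 : n = 0
    · subst h0
      rw [natToBinCore]
      simp [toBits_zero]
    · rw [core_step n h0, toBits, ← ih (n / 2) (by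
        have : (2:Nat) ^ (w + 1) = 2 * 2 ^ w := by ring
        omega)]
      have hL : w + 1 - ((natToBinCore (n / 2)).length + 1) = w - (natToBinCore (n / 2)).length := by
        omega
      simp [hL, List.append_assoc]

-- per-character facts
theorem char_bits (v : Nat) (h : v < 256) : pad8 (natToBin v) = toBits 8 v := by
  unfold pad8 natToBin
  by_cases h0 : v = 0
  · subst h0
    rw [toBits_zero]
    decide
  · simp only [h0, if_false]
    exact core_pad 8 v h

theorem foldB_spec : ∀ (cs : List Char) (acc nbits : Nat) (out : List Char),
    nbits < 5 → (∀ c ∈ cs, c.toNat < 128) →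
    finalize (cs.foldl stepB (acc, nbits, out))
      = out ++ encLoop (padLoop 4 (toBits nbits acc ++ allBits cs)) := by
  intro cs
  induction cs with
  | nil =>
    intro acc nbits out hn _
    simp only [List.foldl_nil, allBits, List.flatMap_nil, List.append_nil]
    rw [padLoop_eq, toBits_length]
    have hmod : nbits % 5 = nbits := Nat.mod_eq_of_lt hn
    rcases Nat.eq_zero_or_pos nbits with h0 | hpos
    · subst h0
      have h0 : encLoop [] = [] := by rw [encLoop]; simp
      simp [finalize, toBits, h0]
    · have hk : (5 - nbits % 5) % 5 = 5 - nbits := by omega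
      rw [hk]
      have hlen : (toBits nbits acc ++ List.replicate (5 - nbits) '0').length = 5 := by
        simp [toBits_length]; omega
      rw [encLooponce hlen]
      rw [binToNat_append, binToNat_toBits, binToNat_replicate_zero, List.length_replicate]
      simp only [finalize, if_pos hpos, Nat.add_zero]
      congr 3
      rw [and31_eq_mod]
      have hs : acc <<< (5 - nbits) = acc * 2 ^ (5 - nbits) := Nat.shiftLeft_eq _ _
      rw [hs]
      have h32 : (32:Nat) = 2 ^ nbits * 2 ^ (5 - nbits) := by
        rw [← pow_add, show nbits + (5 - nbits) = 5 by omega]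
        norm_num
      rw [h32, Nat.mul_mod_mul_right]
  | cons c cs ih =>
    intro acc nbits out hn hc
    have hv : c.toNat < 128 := hc c (by simp)
    have hor : (acc <<< 8) ||| c.toNat = acc * 256 + c.toNat := by
      rw [← Nat.shiftLeft_add_eq_or_of_lt (by omega : c.toNat < 2 ^ 8), Nat.shiftLeft_eq]
    simp only [List.foldl_cons]
    have hstep : stepB (acc, nbits, out) c
        = ((acc * 256 + c.toNat) % 2 ^ ((nbits + 8) % 5),
           (nbits + 8) % 5,
           out ++ encLoop (toBits (nbits + 8 - (nbits + 8) % 5) ((acc * 256 + c.toNat) / 2 ^ ((nbits + 8) % 5)))) := by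
      unfold stepB
      simp only [hor]
      rw [emitLoop_spec, Nat.one_shiftLeft, Nat.and_two_pow_sub_one_eq_mod]
    rw [hstep, ih _ _ _ (Nat.mod_lt _ (by norm_num)) (fun x hx => hc x (by simp [hx]))]
    set f := (nbits + 8) % 5 with hf
    set acc1 := acc * 256 + c.toNat with hacc1
    have hmask : toBits f (acc1 % 2 ^ f) = toBits f acc1 := by
      have hdm : acc1 / 2 ^ f * 2 ^ f + acc1 % 2 ^ f = acc1 := by
        rw [Nat.mul_comm]
        exact Nat.div_add_mod acc1 (2 ^ f)
      conv_rhs => rw [← hdm]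
      rw [toBits_irrel _ _ _ (Nat.mod_lt _ (Nat.two_pow_pos f))]
    rw [hmask]
    have hcomb : toBits nbits acc ++ toBits 8 c.toNat = toBits (nbits + 8) acc1 :=
      toBits_append _ _ _ _ (by norm_num; omega)
    have hsplit : toBits (nbits + 8) acc1
        = toBits (nbits + 8 - f) (acc1 / 2 ^ f) ++ toBits f acc1 := by
      have h1 : nbits + 8 = (nbits + 8 - f) + f := by omega
      conv_lhs => rw [h1]
      rw [toBits_split]
    have hXlen : (toBits (nbits + 8 - f) (acc1 / 2 ^ f)).length % 5 = 0 := by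
      rw [toBits_length]; omega
    obtain ⟨m, hm⟩ : ∃ m, (toBits (nbits + 8 - f) (acc1 / 2 ^ f)).length = 5 * m :=
      ⟨(nbits + 8 - f) / 5, by rw [toBits_length]; omega⟩
    simp only [allBits, List.flatMap_cons]
    rw [← List.append_assoc, hcomb, hsplit]
    conv_rhs => rw [List.append_assoc, padLoop_append5 _ _ hXlen, encLoop_append5 m _ _ hm]
    simp [List.append_assoc]

theorem bits_of_chars : ∀ (cs : List Char), (∀ c ∈ cs, c.toNat < 128) →
    cs.flatMap (fun c => pad8 (natToBin c.toNat)) = allBits cs := by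
  intro cs h
  induction cs with
  | nil => rfl
  | cons c cs ih =>
    have hv := h c (by simp)
    have := char_bits c.toNat (by omega)
    simp only [List.flatMap_cons, allBits] at *
    rw [this, ih (fun x hx => h x (by simp [hx]))]

theorem dom_chars {s : String} (h : Dom_encode_base32_crockford s) :
    ∀ c ∈ s.toList, c.toNat < 128 := by
  intro c hc
  unfold Dom_encode_base32_crockford pvDomStr at h
  rw [List.all_eq_true] at h
  have := h c hc
  unfold pvDomChar at this
  simp at this
  omega

-- ===== VERDICT (by name: the statement is the Claim_ definition above) =====
theorem encode_base32_crockford_spec : Claim_equal_encode_base32_crockford := by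
  intro s hdom
  unfold Spec_encode_base32_crockford
  have hchars := dom_chars hdom
  have hA : encode_base32_crockford s = String.mk (encLoop (padLoop 4 (allBits s.toList))) := by
    unfold encode_base32_crockford
    rw [bits_of_chars s.toList hchars]
  have hB : encode_base32_crockford_alt s
      = String.mk (finalize (s.toList.foldl stepB (0, 0, []))) := rfl
  rw [hA, hB, foldB_spec s.toList 0 0 [] (by norm_num) hchars]
  simp [toBits]
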